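-- pv_equiv track=rewrite | github.com/psychemistz/csi-tme | splisosm/analysis/single_sample.py | build_isoform_mapping
-- ===== SOURCE A (Python) =====
-- def build_isoform_mapping(genes: list, separator: str = '-') -> dict:
--     """Build mapping from base gene to isoform indices.
--
--     Parameters
--     ----------
--     genes : list
--         Gene/isoform names (e.g., ["VEGF-001", "VEGF-002", "IL6-001"])
--     separator : str
--         Character separating gene name from isoform suffix
--
--     Returns
--     -------
--     mapping : dict
--         Maps gene name -> list of column indices
--     """
--     mapping = {}
--     for i, gene in enumerate(genes):
--         parts = gene.rsplit(separator, 1)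
--         base_name = parts[0]
--
--         if base_name not in mapping:
--             mapping[base_name] = []
--         mapping[base_name].append(i)
--
--     # Filter to genes with multiple isoforms
--     mapping = {k: v for k, v in mapping.items() if len(v) > 1}
--
--     return mapping
-- ===== SOURCE B (Python) =====
-- def build_isoform_mapping(genes: list, separator: str = '-') -> dict:
--     """Count base-name multiplicities first, then emit only multi-isoform
--     groups in one filtered pass (singleton groups are never materialized)."""
--     bases = [g.rsplit(separator, 1)[0] for g in genes]
--     counts = {}
--     for b in bases:
--         counts[b] = counts.get(b, 0) + 1
--     mapping = {}
--     for i, b in enumerate(bases):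
--         if counts.get(b, 0) > 1:
--             mapping.setdefault(b, []).append(i)
--     return mapping
-- ===== Notes on version B (the rewrite author's own statement) =====
-- stated objective: alternative
-- what changed: Instead of accumulating every group and then filtering the dict by value length, B precomputes base-name multiplicities with a counter and then emits indices in one guarded pass, never materializing singleton groups.
import Mathlib
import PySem

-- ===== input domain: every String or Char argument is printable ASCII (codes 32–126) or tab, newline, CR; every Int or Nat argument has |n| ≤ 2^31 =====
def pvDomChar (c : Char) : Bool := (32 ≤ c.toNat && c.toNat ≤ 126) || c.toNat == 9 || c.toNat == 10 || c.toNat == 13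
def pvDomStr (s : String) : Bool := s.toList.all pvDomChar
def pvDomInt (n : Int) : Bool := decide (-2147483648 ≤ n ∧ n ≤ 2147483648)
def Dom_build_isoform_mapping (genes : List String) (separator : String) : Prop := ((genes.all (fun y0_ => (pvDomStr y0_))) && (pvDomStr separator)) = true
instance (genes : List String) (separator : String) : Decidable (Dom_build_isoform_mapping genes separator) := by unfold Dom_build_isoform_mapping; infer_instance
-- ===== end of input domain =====

-- B replaces A's build-all-groups-then-filter dict with a count-first pass that
-- only ever materializes multi-isoform groups (alternative decomposition, same cost).


-- ===== PORT A =====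
-- gene.rsplit(separator, 1)[0] for a NONEMPTY separator (Pre_ excludes ""):
-- everything before the last occurrence of separator, or the whole string if absent.
-- Exact via PySem.Str.rfind; `take j.toNat` = gene[:j] since j ≥ 0 when j ≠ -1.
def pvBase (gene : String) (separator : String) : String :=
  let j := PySem.Str.rfind gene separator
  if j = -1 then gene else String.mk (gene.toList.take j.toNat)

def build_isoform_mapping (genes : List String) (separator : String) : List (String × List Int) :=
  let mapping := (PySem.List.enumerate genes).foldl
    (fun m p =>
      let base_name := pvBase p.2 separator
      let m := if m.contains base_name then m else m.insert base_name ([] : List Int)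
      m.modify base_name [] (· ++ [p.1]))
    PySem.Dict.empty
  -- {k: v for k, v in mapping.items() if len(v) > 1}, returned as its items list
  mapping.items.filter (fun kv => kv.2.length > 1)

-- ===== PORT B =====
def build_isoform_mapping_alt (genes : List String) (separator : String) : List (String × List Int) :=
  let bases := genes.map (fun g => pvBase g separator)
  let counts := bases.foldl (fun d b => d.insert b (d.getD b 0 + 1))
    (PySem.Dict.empty : PySem.Dict String Int)
  let mapping := (PySem.List.enumerate bases).foldl
    (fun d p => if counts.getD p.2 0 > 1 then d.modify p.2 [] (· ++ [p.1]) else d)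
    PySem.Dict.empty
  mapping.items

-- ===== PRECONDITION & SPEC =====
-- Pre_ excludes only the inputs where A raises: an empty separator with at least one
-- gene, on which Python's rsplit raises ValueError.
def Pre_build_isoform_mapping (genes : List String) (separator : String) : Prop := genes = [] ∨ separator ≠ ""
instance (genes : List String) (separator : String) : Decidable (Pre_build_isoform_mapping genes separator) := by unfold Pre_build_isoform_mapping; infer_instance
def pvWitness_build_isoform_mapping : List String × String := (["VEGF-001", "VEGF-002", "IL6-001"], "-")

def Spec_build_isoform_mapping (genes : List String) (separator : String) (out : List (String × List Int)) : Prop := out = build_isoform_mapping_alt genes separator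
instance (genes : List String) (separator : String) (out : List (String × List Int)) : Decidable (Spec_build_isoform_mapping genes separator out) := by unfold Spec_build_isoform_mapping; infer_instance

-- ===== CLAIM (what is proved, stated in full; the proofs are below) =====
def Claim_equal_build_isoform_mapping : Prop := ∀ (genes : List String) (separator : String), Dom_build_isoform_mapping genes separator → Pre_build_isoform_mapping genes separator → Spec_build_isoform_mapping genes separator (build_isoform_mapping genes separator)

-- ===== LEMMAS AND PROOFS =====

-- the canonical grouping fold both ports reduce to: (key, value) pairs appended per key
def pvGrp (l : List (String × Int)) : PySem.Dict String (List Int) :=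
  l.foldl (fun d p => d.modify p.1 [] (· ++ [p.2])) PySem.Dict.empty

-- A's "if absent insert []" followed by append is exactly Dict.modify
theorem pv_stepA_eq (m : PySem.Dict String (List Int)) (b : String) (i : Int) :
    (if m.contains b then m else m.insert b ([] : List Int)).modify b [] (· ++ [i])
      = m.modify b [] (· ++ [i]) := by
  by_cases h : m.contains b
  · simp [h]
  · simp only [Bool.not_eq_true] at h
    simp only [h, Bool.false_eq_true, if_false, PySem.Dict.modify,
      PySem.Dict.getD_insert_self, PySem.Dict.insert_insert_self,
      PySem.Dict.getD_of_not_contains _ _ h]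

theorem pv_enumerate_map {α β : Type} (f : α → β) (xs : List α) (s : Int) :
    PySem.List.enumerate (xs.map f) s
      = (PySem.List.enumerate xs s).map (fun p => (p.1, f p.2)) := by
  induction xs generalizing s with
  | nil => rfl
  | cons x xs ih => simp [PySem.List.enumerate_cons, ih]

-- items of the grouping fold: one entry per distinct key, in first-occurrence order
theorem pv_grp_items (l : List (String × Int)) :
    (pvGrp l).items
      = (PySem.Set.ofList (l.map (·.1))).map
          (fun k => (k, (l.filter (fun p => p.1 == k)).map (·.2))) := by
  have hkeys : (pvGrp l).keys = PySem.Set.ofList (l.map (·.1)) := by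
    have := PySem.Dict.keys_foldl_modify_key l (·.1) ([] : List Int)
      (fun _ p => (· ++ [p.2])) PySem.Dict.empty
    simpa [pvGrp, PySem.Dict.empty, PySem.Set.update_empty] using this
  have hnd : (pvGrp l).keys.Nodup := by
    have := PySem.Dict.nodup_keys_foldl_modify_key l (·.1) ([] : List Int)
      (fun _ p => (· ++ [p.2])) PySem.Dict.empty (by simp [PySem.Dict.empty, PySem.Dict.keys])
    simpa [pvGrp] using this
  have hitems := PySem.Dict.items_eq_map_keys (pvGrp l) hnd ([] : List Int)
  rw [hitems, hkeys]
  refine List.map_congr_left fun k _ => ?_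
  have := PySem.Dict.getD_foldl_modify_append l PySem.Dict.empty k
  simp only [pvGrp]
  rw [show (fun (d : PySem.Dict String (List Int)) (p : String × Int) =>
        d.modify p.1 [] (· ++ [p.2]))
      = (fun d p => d.modify p.1 [] fun x => x ++ [p.2]) from rfl, this]
  simp [PySem.Dict.empty, PySem.Dict.getD, PySem.Dict.get?]

-- set(filter) = filter(set)
theorem pv_ofList_filter (q : String → Bool) (xs : List String) :
    PySem.Set.ofList (xs.filter q) = (PySem.Set.ofList xs).filter q := by
  induction xs with
  | nil => rfl
  | cons x xs ih =>
    by_cases hq : q x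
    · rw [List.filter_cons_of_pos hq, PySem.Set.ofList_cons, PySem.Set.ofList_cons, ih]
      rw [List.filter_cons_of_pos hq]
      simp only [PySem.Set.discard, List.filter_filter]
      congr 1
      exact List.filter_congr fun y _ => by rw [Bool.and_comm]
    · rw [List.filter_cons_of_neg hq, ih, PySem.Set.ofList_cons,
        List.filter_cons_of_neg hq]
      simp only [PySem.Set.discard, List.filter_filter]
      refine (List.filter_congr fun y _ => ?_).symm
      by_cases hyx : y == x
      · have : y = x := by simpa using hyx
        simp [this, hq]
      · simp at hyx; simp [hyx]

-- a guarded fold is a fold over the filtered list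
theorem pv_foldl_ite_filter {α β : Type} (q : α → Prop) [DecidablePred q]
    (f : β → α → β) (l : List α) (init : β) :
    l.foldl (fun d x => if q x then f d x else d) init
      = (l.filter (fun x => decide (q x))).foldl f init := by
  rw [List.foldl_filter]
  simp

-- the crux: grouping the pre-filtered pairs = filtering A's groups by size
theorem pv_grp_filter_items (l : List (String × Int)) :
    (pvGrp (l.filter (fun r => decide (1 < (l.map (·.1)).count r.1)))).items
      = (pvGrp l).items.filter (fun kv => kv.2.length > 1) := by
  rw [pv_grp_items, pv_grp_items]
  rw [List.filter_map]
  have hcnt : ∀ k : String,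
      ((l.filter (fun p => p.1 == k)).map (·.2)).length = (l.map (·.1)).count k := by
    intro k
    induction l with
    | nil => rfl
    | cons r l ih =>
      by_cases hrk : r.1 == k
      · simp only [List.filter_cons, hrk, if_true, List.map_cons, List.length_cons,
          List.count_cons, ih]
      · simp only [List.filter_cons, hrk, Bool.false_eq_true, if_false, List.map_cons,
          List.count_cons, ih]
        simp
  have hpred : ((fun kv : String × List Int => decide (kv.2.length > 1)) ∘
        (fun k => (k, (l.filter (fun p => p.1 == k)).map (·.2))))
      = fun k => decide (1 < (l.map (·.1)).count k) := by
    funext k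
    simp only [Function.comp, gt_iff_lt, hcnt]
  have hfst : (l.filter (fun r => decide (1 < (l.map (·.1)).count r.1))).map (·.1)
      = (l.map (·.1)).filter (fun b => decide (1 < (l.map (·.1)).count b)) := by
    rw [List.filter_map]
    rfl
  rw [hpred, hfst, pv_ofList_filter]
  refine List.map_congr_left fun k hk => ?_
  have hk1 : decide (1 < (l.map (·.1)).count k) = true := (List.mem_filter.mp hk).2
  congr 1
  rw [List.filter_filter]
  refine congrArg (List.map (fun p : String × Int => p.2)) (List.filter_congr fun r _ => ?_)
  by_cases hrk : r.1 == k
  · have : r.1 = k := by simpa using hrk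
    simp [this, hk1]
  · simp [hrk]

-- ===== VERDICT (by name: the statement is the Claim_ definition above) =====
theorem build_isoform_mapping_spec : Claim_equal_build_isoform_mapping := by
  intro genes separator _ _
  unfold Spec_build_isoform_mapping build_isoform_mapping build_isoform_mapping_alt
  simp only []
  set bases := genes.map (fun g => pvBase g separator) with hbases
  set L : List (String × Int) :=
    (PySem.List.enumerate bases).map (fun p => (p.2, p.1)) with hL
  have hLfst : L.map (·.1) = bases := by
    rw [hL, List.map_map]
    exact PySem.List.map_snd_enumerate bases 0
  -- A side
  have hA : (PySem.List.enumerate genes).foldl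
      (fun m p =>
        let base_name := pvBase p.2 separator
        let m := if m.contains base_name then m else m.insert base_name ([] : List Int)
        m.modify base_name [] (· ++ [p.1]))
      PySem.Dict.empty = pvGrp L := by
    simp only [pv_stepA_eq]
    rw [hL, hbases, pv_enumerate_map, List.map_map, pvGrp, List.foldl_map]
    rfl
  rw [hA]
  -- B side
  rw [PySem.Dict.foldl_insert_getD_add_one_eq_counter]
  have hB : (PySem.List.enumerate bases).foldl
      (fun d p => if (PySem.Dict.counter bases).getD p.2 0 > 1
        then d.modify p.2 [] (· ++ [p.1]) else d)
      PySem.Dict.empty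
      = pvGrp (L.filter (fun r => decide (1 < bases.count r.1))) := by
    simp only [PySem.Dict.getD_counter, gt_iff_lt]
    rw [pv_foldl_ite_filter (q := fun p : Int × String => 1 < (bases.count p.2 : Int))]
    rw [pvGrp, hL, List.filter_map, List.foldl_map]
    congr 1
    refine List.filter_congr fun p _ => ?_
    simp
  rw [hB, ← hLfst]
  exact (pv_grp_filter_items L).symm
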